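-- pv_equiv track=rewrite | github.com/saqlainrai/DSA-Mid-Project | GUI Design/Algorithms/JumpSearch.py | LinearSearch_filter
-- ===== SOURCE A (Python) =====
-- def exchangeRowsandColumns(List):
--     array = [[0 for i in range(len(List))] for j in range(7)]
--     for i in range(0,len(List)):
--         array[0][i] = List[i][0]
--         array[1][i] = List[i][1]
--         array[2][i] = List[i][2]
--         array[3][i] = List[i][3]
--         array[4][i] = List[i][4]
--         array[5][i] = List[i][5]
--         array[6][i] = List[i][6]
--     return array
--
-- def wordStartWith(firstLetter, comparisonLetter):
--     firstLetter = list(firstLetter)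
--     comparisonLetter = list(comparisonLetter)
--     for i in range(len(comparisonLetter)):
--         if (comparisonLetter[i] != firstLetter[i]):
--             return False
--     return True
--
-- def wordExactEquals(firstLetter,comparisonLetter):
--     if firstLetter == comparisonLetter:
--         return True
--     else:
--         return False
--
-- def wordEndWith(firstLetter, comparisonLetter):
--     firstLetter = list(firstLetter)
--     comparisonLetter = list(comparisonLetter)
--     firstLetter = firstLetter[::-1]
--     comparisonLetter = comparisonLetter[::-1]
--     for i in range(len(comparisonLetter)):
--         if (comparisonLetter[i] != firstLetter[i]):
--             return False
--     return True
--
-- def wordContains(firstLetter, comparisonLetter):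
--     if comparisonLetter in firstLetter:
--         return True
--     return False
--
-- def compareBySwitchingCondition(firstLetter,comparisonLetter,switchingNo):
--     if(switchingNo == 0): # start With
--         return wordStartWith(firstLetter,comparisonLetter)
--     if(switchingNo == 1): # End With
--         return wordEndWith(firstLetter,comparisonLetter)
--     if(switchingNo == 2): # Contains With
--         return wordContains(firstLetter,comparisonLetter)
--     if(switchingNo == 3): # Exact With
--         return wordExactEquals(firstLetter,comparisonLetter)
--     return False
--
-- def LinearSearch_filter(data,rowNumber,comparisonletter,startingidx,end,switchingNo):
--     comparisonletter = str(comparisonletter)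
--     dataColumnList = []
--     searchedData = []
--     for i in range(startingidx,end):
--         if(compareBySwitchingCondition(str(data[rowNumber][i]),comparisonletter,switchingNo)):
--             dataColumnList.append(i)
--
--
--     for k in range(0,len(dataColumnList)):
--         lis = []
--         for s in range(0,7):
--             lis.append(data[s][dataColumnList[k]])
--
--         searchedData.append(lis)
--     Data = exchangeRowsandColumns(searchedData)
--     return Data,dataColumnList
-- ===== SOURCE B (Python) =====
-- def LinearSearch_filter(data, rowNumber, comparisonletter, startingidx, end, switchingNo):
--     # One fused pass: each matching column is appended to the 7 output rows and to the
--     # index list as it is found; no intermediate per-column rows, no transpose pass.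
--     comparisonletter = str(comparisonletter)
--     r0, r1, r2, r3, r4, r5, r6 = [], [], [], [], [], [], []
--     cols = []
--     for i in range(startingidx, end):
--         w = str(data[rowNumber][i])
--         if switchingNo == 0:
--             ok = w.startswith(comparisonletter)
--         elif switchingNo == 1:
--             ok = w.endswith(comparisonletter)
--         elif switchingNo == 2:
--             ok = comparisonletter in w
--         elif switchingNo == 3:
--             ok = w == comparisonletter
--         else:
--             ok = False
--         if ok:
--             cols.append(i)
--             r0.append(data[0][i])
--             r1.append(data[1][i])
--             r2.append(data[2][i])
--             r3.append(data[3][i])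
--             r4.append(data[4][i])
--             r5.append(data[5][i])
--             r6.append(data[6][i])
--     return [r0, r1, r2, r3, r4, r5, r6], cols
-- ===== Notes on version B (the rewrite author's own statement) =====
-- stated objective: simpler
-- what changed: B is one fused scan that, on each match, appends the index and that column's 7 fields directly to 7 row accumulators, replacing A's three staged passes (collect indices, gather per-column 7-element rows, transpose via a preallocated placeholder matrix) and its hand-written char-by-char prefix/suffix scans with the standard string predicates.
import Mathlib
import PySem

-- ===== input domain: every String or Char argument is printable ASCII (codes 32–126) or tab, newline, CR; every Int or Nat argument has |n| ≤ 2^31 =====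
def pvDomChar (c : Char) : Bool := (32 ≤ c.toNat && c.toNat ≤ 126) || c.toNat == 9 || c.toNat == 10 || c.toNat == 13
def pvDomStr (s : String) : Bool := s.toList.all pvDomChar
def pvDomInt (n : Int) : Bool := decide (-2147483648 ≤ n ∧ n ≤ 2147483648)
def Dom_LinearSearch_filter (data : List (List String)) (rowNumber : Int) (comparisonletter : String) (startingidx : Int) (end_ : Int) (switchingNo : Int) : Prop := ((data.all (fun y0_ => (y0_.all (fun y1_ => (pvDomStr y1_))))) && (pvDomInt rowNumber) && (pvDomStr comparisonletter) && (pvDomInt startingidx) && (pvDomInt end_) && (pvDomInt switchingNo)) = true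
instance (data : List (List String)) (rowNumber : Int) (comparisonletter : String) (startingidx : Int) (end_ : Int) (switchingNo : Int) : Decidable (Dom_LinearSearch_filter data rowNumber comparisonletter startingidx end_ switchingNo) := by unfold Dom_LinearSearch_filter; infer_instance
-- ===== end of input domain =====

-- B fuses A's three staged passes (collect indices / gather per-column rows / transpose) into one
-- scan with 7 row accumulators (objective: simpler; return value only, no mutation).

-- ===== PORT A =====
-- faithful transliteration of A's helpers; where the Python RAISES (IndexError on a too-short
-- word, out-of-range list index) the port reads a default value — those inputs are excluded by Pre_.
def wordStartWith (firstLetter comparisonLetter : String) : Bool :=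
  let f := firstLetter.toList
  let c := comparisonLetter.toList
  (List.range c.length).all (fun i => c.getD i ' ' == f.getD i ' ')

def wordExactEquals (firstLetter comparisonLetter : String) : Bool :=
  if firstLetter == comparisonLetter then true else false

def wordEndWith (firstLetter comparisonLetter : String) : Bool :=
  let f := firstLetter.toList.reverse
  let c := comparisonLetter.toList.reverse
  (List.range c.length).all (fun i => c.getD i ' ' == f.getD i ' ')

def wordContains (firstLetter comparisonLetter : String) : Bool :=
  if PySem.Str.isIn comparisonLetter firstLetter then true else false

def compareBySwitchingCondition (firstLetter comparisonLetter : String) (switchingNo : Int) : Bool :=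
  if switchingNo = 0 then wordStartWith firstLetter comparisonLetter
  else if switchingNo = 1 then wordEndWith firstLetter comparisonLetter
  else if switchingNo = 2 then wordContains firstLetter comparisonLetter
  else if switchingNo = 3 then wordExactEquals firstLetter comparisonLetter
  else false

def exchangeRowsandColumns (lst : List (List String)) : List (List String) :=
  -- array = [[0]*len(List) for j in range(7)]; the 0 placeholder becomes "" (always overwritten)
  let array := (List.range 7).map (fun _ => (List.range lst.length).map (fun _ => ""))
  (List.range lst.length).foldl (fun arr i =>
    let row := lst.getD i []
    let arr := arr.set 0 ((arr.getD 0 []).set i (row.getD 0 ""))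
    let arr := arr.set 1 ((arr.getD 1 []).set i (row.getD 1 ""))
    let arr := arr.set 2 ((arr.getD 2 []).set i (row.getD 2 ""))
    let arr := arr.set 3 ((arr.getD 3 []).set i (row.getD 3 ""))
    let arr := arr.set 4 ((arr.getD 4 []).set i (row.getD 4 ""))
    let arr := arr.set 5 ((arr.getD 5 []).set i (row.getD 5 ""))
    arr.set 6 ((arr.getD 6 []).set i (row.getD 6 ""))) array

def LinearSearch_filter (data : List (List String)) (rowNumber : Int) (comparisonletter : String) (startingidx : Int) (end_ : Int) (switchingNo : Int) : List (List String) × List Int :=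
  -- comparisonletter = str(comparisonletter) is the identity on a string
  let dataColumnList := (PySem.List.pyRange startingidx end_ 1).foldl (fun acc i =>
    if compareBySwitchingCondition (PySem.List.pyGetD (PySem.List.pyGetD data rowNumber []) i "") comparisonletter switchingNo
    then acc ++ [i] else acc) []
  let searchedData := (List.range dataColumnList.length).foldl (fun acc k =>
    let lis := (List.range 7).foldl (fun l s =>
      l ++ [PySem.List.pyGetD (PySem.List.pyGetD data (Int.ofNat s) []) (dataColumnList.getD k 0) ""]) []
    acc ++ [lis]) []
  (exchangeRowsandColumns searchedData, dataColumnList)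

-- ===== PORT B =====
def pvPred (switchingNo : Int) (w c : String) : Bool :=
  if switchingNo = 0 then PySem.Str.startswith w c
  else if switchingNo = 1 then PySem.Str.endswith w c
  else if switchingNo = 2 then PySem.Str.isIn c w
  else if switchingNo = 3 then w == c
  else false

-- state: the 7 row accumulators r0..r6 and the index list cols, as in Source B
def LinearSearch_filter_alt (data : List (List String)) (rowNumber : Int) (comparisonletter : String) (startingidx : Int) (end_ : Int) (switchingNo : Int) : List (List String) × List Int :=
  let st := (PySem.List.pyRange startingidx end_ 1).foldl
    (fun (st : (List String × List String × List String × List String × List String × List String × List String) × List Int) i =>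
      let w := PySem.List.pyGetD (PySem.List.pyGetD data rowNumber []) i ""
      if pvPred switchingNo w comparisonletter then
        ((st.1.1 ++ [PySem.List.pyGetD (PySem.List.pyGetD data 0 []) i ""],
          st.1.2.1 ++ [PySem.List.pyGetD (PySem.List.pyGetD data 1 []) i ""],
          st.1.2.2.1 ++ [PySem.List.pyGetD (PySem.List.pyGetD data 2 []) i ""],
          st.1.2.2.2.1 ++ [PySem.List.pyGetD (PySem.List.pyGetD data 3 []) i ""],
          st.1.2.2.2.2.1 ++ [PySem.List.pyGetD (PySem.List.pyGetD data 4 []) i ""],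
          st.1.2.2.2.2.2.1 ++ [PySem.List.pyGetD (PySem.List.pyGetD data 5 []) i ""],
          st.1.2.2.2.2.2.2 ++ [PySem.List.pyGetD (PySem.List.pyGetD data 6 []) i ""]),
         st.2 ++ [i])
      else st)
    (([], [], [], [], [], [], []), [])
  ([st.1.1, st.1.2.1, st.1.2.2.1, st.1.2.2.2.1, st.1.2.2.2.2.1, st.1.2.2.2.2.2.1, st.1.2.2.2.2.2.2], st.2)

-- ===== PRECONDITION & SPEC =====
-- Pre_ excludes exactly the inputs where Python A raises IndexError: an out-of-range rowNumber or
-- scan index, a scanned word that is a proper prefix/suffix of the pattern under modes 0/1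
-- (A's char loop then reads past the word), and a matched column missing from one of rows 0..6.
def Pre_LinearSearch_filter (data : List (List String)) (rowNumber : Int) (comparisonletter : String) (startingidx : Int) (end_ : Int) (switchingNo : Int) : Prop :=
  startingidx < end_ →
    (PySem.Raise.InRange data.length rowNumber ∧
     -((PySem.List.pyGetD data rowNumber []).length : Int) ≤ startingidx ∧
     end_ ≤ ((PySem.List.pyGetD data rowNumber []).length : Int) ∧
     ∀ i ∈ PySem.List.pyRange startingidx end_ 1,
       (switchingNo = 0 → ¬ ((PySem.List.pyGetD (PySem.List.pyGetD data rowNumber []) i "").toList.length < comparisonletter.toList.length ∧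
           (PySem.List.pyGetD (PySem.List.pyGetD data rowNumber []) i "").toList <+: comparisonletter.toList)) ∧
       (switchingNo = 1 → ¬ ((PySem.List.pyGetD (PySem.List.pyGetD data rowNumber []) i "").toList.length < comparisonletter.toList.length ∧
           (PySem.List.pyGetD (PySem.List.pyGetD data rowNumber []) i "").toList <:+ comparisonletter.toList)) ∧
       (pvPred switchingNo (PySem.List.pyGetD (PySem.List.pyGetD data rowNumber []) i "") comparisonletter = true →
         ∀ s ∈ List.range 7, PySem.Raise.InRange (PySem.List.pyGetD data (Int.ofNat s) []).length i))
instance (data : List (List String)) (rowNumber : Int) (comparisonletter : String) (startingidx : Int) (end_ : Int) (switchingNo : Int) : Decidable (Pre_LinearSearch_filter data rowNumber comparisonletter startingidx end_ switchingNo) := by unfold Pre_LinearSearch_filter; infer_instance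

def pvWitness_LinearSearch_filter : List (List String) × Int × String × Int × Int × Int :=
  ([["ab", "x"], ["1", "2"], ["3", "4"], ["5", "6"], ["7", "8"], ["9", "a"], ["b", "c"]], 0, "a", 0, 2, 0)

def Spec_LinearSearch_filter (data : List (List String)) (rowNumber : Int) (comparisonletter : String) (startingidx : Int) (end_ : Int) (switchingNo : Int) (out : List (List String) × List Int) : Prop := out = LinearSearch_filter_alt data rowNumber comparisonletter startingidx end_ switchingNo
instance (data : List (List String)) (rowNumber : Int) (comparisonletter : String) (startingidx : Int) (end_ : Int) (switchingNo : Int) (out : List (List String) × List Int) : Decidable (Spec_LinearSearch_filter data rowNumber comparisonletter startingidx end_ switchingNo out) := by unfold Spec_LinearSearch_filter; infer_instance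

-- ===== CLAIM (what is proved, stated in full; the proofs are below) =====
def Claim_equal_LinearSearch_filter : Prop := ∀ (data : List (List String)) (rowNumber : Int) (comparisonletter : String) (startingidx : Int) (end_ : Int) (switchingNo : Int), Dom_LinearSearch_filter data rowNumber comparisonletter startingidx end_ switchingNo → Pre_LinearSearch_filter data rowNumber comparisonletter startingidx end_ switchingNo → Spec_LinearSearch_filter data rowNumber comparisonletter startingidx end_ switchingNo (LinearSearch_filter data rowNumber comparisonletter startingidx end_ switchingNo)

-- ===== LEMMAS AND PROOFS =====

lemma prefix_of_getD {α : Type} [Inhabited α] (x y : List α) (d : α) (hle : x.length ≤ y.length)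
    (h : ∀ i < x.length, x.getD i d = y.getD i d) : x <+: y := by
  rw [List.prefix_iff_eq_take]
  apply List.ext_getElem
  · simp [Nat.min_eq_left hle]
  · intro i hi hi2
    have := h i hi
    simp only [List.getD_eq_getElem?_getD] at this
    rw [List.getElem_take]
    rw [List.getElem?_eq_getElem hi, List.getElem?_eq_getElem (lt_of_lt_of_le hi hle)] at this
    simpa using this

-- A's char-by-char scan agrees with the library prefix test whenever it does not raise
lemma allRange_eq_prefix (c f : List Char)
    (h : ¬ (f.length < c.length ∧ f <+: c)) :
    (List.range c.length).all (fun i => c.getD i ' ' == f.getD i ' ') = decide (c <+: f) := by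
  rw [Bool.eq_iff_iff]
  simp only [List.all_eq_true, List.mem_range, beq_iff_eq, decide_eq_true_iff]
  constructor
  · intro hall
    by_cases hle : c.length ≤ f.length
    · exact prefix_of_getD c f ' ' hle (fun i hi => hall i hi)
    · have hle' : f.length < c.length := by omega
      exact absurd ⟨hle', prefix_of_getD f c ' ' (le_of_lt hle')
        (fun i hi => (hall i (lt_trans hi hle')).symm)⟩ h
  · intro hpre i hi
    have hle := hpre.length_le
    obtain ⟨t, rfl⟩ := hpre
    rw [List.getD_eq_getElem _ _ hi, List.getD_eq_getElem _ _ (lt_of_lt_of_le hi hle)]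
    simp [List.getElem_append_left hi]

-- A's predicate equals B's wherever A's does not raise
lemma pred_eq (w c : String) (sw : Int)
    (h0 : sw = 0 → ¬ (w.toList.length < c.toList.length ∧ w.toList <+: c.toList))
    (h1 : sw = 1 → ¬ (w.toList.length < c.toList.length ∧ w.toList <:+ c.toList)) :
    compareBySwitchingCondition w c sw = pvPred sw w c := by
  unfold compareBySwitchingCondition pvPred
  split_ifs with e0 e1 e2 e3
  · rw [wordStartWith, allRange_eq_prefix _ _ (h0 e0), Bool.eq_iff_iff]
    simp [PySem.Chars.startswith_iff]
  · rw [wordEndWith]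
    have h' : ¬ ((w.toList.reverse).length < (c.toList.reverse).length ∧ w.toList.reverse <+: c.toList.reverse) := by
      simpa using h1 e1
    rw [allRange_eq_prefix _ _ h', Bool.eq_iff_iff]
    simp [PySem.Chars.endswith_iff]
  · rw [wordContains]; cases PySem.Str.isIn c w <;> simp
  · rw [wordExactEquals]; cases h : (w == c) <;> simp
  · rfl

-- (range l.length).map (fun k => f (l.getD k d)) traverses l itself
lemma map_range_getD {α β : Type} (l : List α) (d : α) (f : α → β) :
    (List.range l.length).map (fun k => f (l.getD k d)) = l.map f := by
  apply List.ext_getElem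
  · simp
  · intro i h1 h2
    simp at h1 ⊢
    rw [List.getElem?_eq_getElem (by simpa using h1)]
    rfl

-- writing h i at every position i of a list of length ≥ m
lemma foldl_set_range {α : Type} (h : Nat → α) :
    ∀ (m : Nat) (v : List α), m ≤ v.length →
    (List.range m).foldl (fun w i => w.set i (h i)) v = (List.range m).map h ++ v.drop m := by
  intro m
  induction m with
  | zero => simp
  | succ m ih =>
    intro v hv
    rw [List.range_succ, List.foldl_append, ih v (by omega)]
    have hm : m < v.length := by omega
    have hlen : ((List.range m).map h).length = m := by simp
    simp only [List.foldl_cons, List.foldl_nil]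
    rw [List.set_append]
    simp only [hlen]
    rw [if_neg (by omega)]
    rw [List.drop_eq_getElem_cons hm]
    simp only [Nat.sub_self, List.set_cons_zero]
    simp

-- A's fill loop, componentwise on the 7 rows
lemma exchange_fold (lst : List (List String)) :
    ∀ (n : Nat) (a0 a1 a2 a3 a4 a5 a6 : List String),
    (List.range n).foldl (fun arr i =>
      let row := lst.getD i []
      let arr := arr.set 0 ((arr.getD 0 []).set i (row.getD 0 ""))
      let arr := arr.set 1 ((arr.getD 1 []).set i (row.getD 1 ""))
      let arr := arr.set 2 ((arr.getD 2 []).set i (row.getD 2 ""))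
      let arr := arr.set 3 ((arr.getD 3 []).set i (row.getD 3 ""))
      let arr := arr.set 4 ((arr.getD 4 []).set i (row.getD 4 ""))
      let arr := arr.set 5 ((arr.getD 5 []).set i (row.getD 5 ""))
      arr.set 6 ((arr.getD 6 []).set i (row.getD 6 ""))) [a0, a1, a2, a3, a4, a5, a6]
    = [(List.range n).foldl (fun w i => w.set i ((lst.getD i []).getD 0 "")) a0,
       (List.range n).foldl (fun w i => w.set i ((lst.getD i []).getD 1 "")) a1,
       (List.range n).foldl (fun w i => w.set i ((lst.getD i []).getD 2 "")) a2,
       (List.range n).foldl (fun w i => w.set i ((lst.getD i []).getD 3 "")) a3,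
       (List.range n).foldl (fun w i => w.set i ((lst.getD i []).getD 4 "")) a4,
       (List.range n).foldl (fun w i => w.set i ((lst.getD i []).getD 5 "")) a5,
       (List.range n).foldl (fun w i => w.set i ((lst.getD i []).getD 6 "")) a6] := by
  intro n
  induction n with
  | zero => intro _ _ _ _ _ _ _; simp
  | succ n ih =>
    intro a0 a1 a2 a3 a4 a5 a6
    simp only [List.range_succ, List.foldl_append, List.foldl_cons, List.foldl_nil, ih]
    rfl

-- closed form of A's transpose
lemma exchange_eq (lst : List (List String)) :
    exchangeRowsandColumns lst
      = (List.range 7).map (fun r => lst.map (fun row => row.getD r "")) := by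
  unfold exchangeRowsandColumns
  rw [show (List.range 7).map (fun _ => (List.range lst.length).map (fun _ => "")) =
      [(List.range lst.length).map (fun _ => ""), (List.range lst.length).map (fun _ => ""),
       (List.range lst.length).map (fun _ => ""), (List.range lst.length).map (fun _ => ""),
       (List.range lst.length).map (fun _ => ""), (List.range lst.length).map (fun _ => ""),
       (List.range lst.length).map (fun _ => "")] from rfl]
  rw [exchange_fold]
  have key : ∀ r : Nat,
      (List.range lst.length).foldl (fun w i => w.set i ((lst.getD i []).getD r ""))
        ((List.range lst.length).map (fun _ => ""))
      = lst.map (fun row => row.getD r "") := by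
    intro r
    rw [foldl_set_range _ lst.length _ (by simp)]
    rw [List.drop_eq_nil_of_le (by simp), List.append_nil]
    exact map_range_getD lst [] (fun row => row.getD r "")
  rw [key 0, key 1, key 2, key 3, key 4, key 5, key 6]
  rfl

-- the field read by B at row s, column c
def pvField (data : List (List String)) (s : Int) (c : Int) : String :=
  PySem.List.pyGetD (PySem.List.pyGetD data s []) c ""

-- invariant of B's fused single pass: after scanning l, the rows hold the fields of
-- the matching columns of l and cols is l filtered by the predicate
lemma alt_fold_eq (data : List (List String)) (rowNumber : Int) (comparisonletter : String) (switchingNo : Int) (l : List Int) :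
    l.foldl
      (fun (st : (List String × List String × List String × List String × List String × List String × List String) × List Int) i =>
        let w := PySem.List.pyGetD (PySem.List.pyGetD data rowNumber []) i ""
        if pvPred switchingNo w comparisonletter then
          ((st.1.1 ++ [PySem.List.pyGetD (PySem.List.pyGetD data 0 []) i ""],
            st.1.2.1 ++ [PySem.List.pyGetD (PySem.List.pyGetD data 1 []) i ""],
            st.1.2.2.1 ++ [PySem.List.pyGetD (PySem.List.pyGetD data 2 []) i ""],
            st.1.2.2.2.1 ++ [PySem.List.pyGetD (PySem.List.pyGetD data 3 []) i ""],
            st.1.2.2.2.2.1 ++ [PySem.List.pyGetD (PySem.List.pyGetD data 4 []) i ""],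
            st.1.2.2.2.2.2.1 ++ [PySem.List.pyGetD (PySem.List.pyGetD data 5 []) i ""],
            st.1.2.2.2.2.2.2 ++ [PySem.List.pyGetD (PySem.List.pyGetD data 6 []) i ""]),
           st.2 ++ [i])
        else st)
      (([], [], [], [], [], [], []), [])
    = (let cols := l.filter (fun i => pvPred switchingNo (PySem.List.pyGetD (PySem.List.pyGetD data rowNumber []) i "") comparisonletter)
       ((cols.map (pvField data 0), cols.map (pvField data 1), cols.map (pvField data 2),
         cols.map (pvField data 3), cols.map (pvField data 4), cols.map (pvField data 5),
         cols.map (pvField data 6)), cols)) := by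
  induction l using List.reverseRecOn with
  | nil => rfl
  | append_singleton l a ih =>
    rw [List.foldl_append, ih, List.filter_append]
    by_cases hp : pvPred switchingNo (PySem.List.pyGetD (PySem.List.pyGetD data rowNumber []) a "") comparisonletter = true
    · simp [hp, pvField]
    · simp [hp]

-- ===== VERDICT (by name: the statement is the Claim_ definition above) =====
theorem LinearSearch_filter_spec : Claim_equal_LinearSearch_filter := by
  intro data rowNumber comparisonletter startingidx end_ switchingNo _hdom hpre
  unfold Spec_LinearSearch_filter LinearSearch_filter LinearSearch_filter_alt
  rw [alt_fold_eq]
  have hcols : (PySem.List.pyRange startingidx end_ 1).foldl (fun acc i =>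
      if compareBySwitchingCondition (PySem.List.pyGetD (PySem.List.pyGetD data rowNumber []) i "") comparisonletter switchingNo
      then acc ++ [i] else acc) []
      = (PySem.List.pyRange startingidx end_ 1).filter (fun i =>
        pvPred switchingNo (PySem.List.pyGetD (PySem.List.pyGetD data rowNumber []) i "") comparisonletter) := by
    rw [PySem.List.foldl_append_if_eq_filter, List.nil_append]
    apply List.filter_congr
    intro i hi
    have hmem := PySem.List.mem_pyRange_one.mp hi
    obtain ⟨_, _, _, hall⟩ := hpre (by omega)
    obtain ⟨h0, h1, _⟩ := hall i hi
    exact pred_eq _ _ _ h0 h1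
  simp only [hcols]
  generalize (PySem.List.pyRange startingidx end_ 1).filter (fun i =>
      pvPred switchingNo (PySem.List.pyGetD (PySem.List.pyGetD data rowNumber []) i "") comparisonletter) = cols
  have hsearch : (List.range cols.length).foldl (fun acc k =>
      let lis := (List.range 7).foldl (fun l s =>
        l ++ [PySem.List.pyGetD (PySem.List.pyGetD data (Int.ofNat s) []) (cols.getD k 0) ""]) []
      acc ++ [lis]) []
      = cols.map (fun c => (List.range 7).map (fun s =>
          PySem.List.pyGetD (PySem.List.pyGetD data (Int.ofNat s) []) c "")) := by
    simp only [PySem.List.foldl_append_singleton_eq_map, List.nil_append]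
    exact map_range_getD cols 0 (fun c => (List.range 7).map (fun s => PySem.List.pyGetD (PySem.List.pyGetD data (Int.ofNat s) []) c ""))
  simp only [hsearch, exchange_eq, List.map_map]
  refine Prod.ext ?_ rfl
  dsimp only
  simp only [List.range_succ, List.range_zero, List.map_append, List.map_cons, List.map_nil]
  simp only [List.nil_append, List.cons_append]
  rfl
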